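-- pv_equiv track=rewrite | github.com/Accieo/aoc-2024 | main/day05.py | classify_updates
-- ===== SOURCE A (Python) =====
-- from typing import Literal, List, Tuple, Dict
--
-- Page = List[int]
--
-- RuleMap = Dict[int, List[int]]
--
-- ClassifiedUpdates = Tuple[List[Page], List[Page]]
--
-- def classify_updates(pages: List[Page], rules: RuleMap) -> ClassifiedUpdates:
--     valid_updates = []
--     invalid_updates = []
--     for update in pages:
--         if is_ordered(update, rules):
--             valid_updates.append(update)
--         else:
--             invalid_updates.append(update)
--
--     return valid_updates, invalid_updates
--
-- def is_ordered(update: Page, rules: RuleMap) -> bool: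
--     update_valid = []
--     for pidx, page in enumerate(update):
--         if page in rules.keys():
--             pages_after = set(update).intersection(rules[page])
--             update_valid.append(all([pidx < update.index(n) for n in pages_after]))
--
--     return all(update_valid)
-- ===== SOURCE B (Python) =====
-- def classify_updates(pages, rules):
--     valid_updates = []
--     invalid_updates = []
--     for update in pages:
--         if is_ok(update, rules):
--             valid_updates.append(update)
--         else:
--             invalid_updates.append(update)
--     return valid_updates, invalid_updates
--
-- def is_ok(update, rules):
--     # streaming check: a rule p -> n is violated exactly when some occurrence of p
--     # is preceded (or met) by n's first occurrence, i.e. n is already 'seen'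
--     seen = set()
--     for page in update:
--         seen.add(page)
--         targets = rules.get(page)
--         if targets is not None and any(n in seen for n in targets):
--             return False
--     return True
-- ===== Notes on version B (the rewrite author's own statement) =====
-- stated objective: alternative
-- what changed: B replaces A's per-page computation over indices (set intersection plus a repeated update.index scan for each rule target) by a streaming scan that keeps a 'seen' set and fails as soon as a page whose rule targets include an already-seen page is reached; no positions or indices are computed at all.
import Mathlib
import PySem

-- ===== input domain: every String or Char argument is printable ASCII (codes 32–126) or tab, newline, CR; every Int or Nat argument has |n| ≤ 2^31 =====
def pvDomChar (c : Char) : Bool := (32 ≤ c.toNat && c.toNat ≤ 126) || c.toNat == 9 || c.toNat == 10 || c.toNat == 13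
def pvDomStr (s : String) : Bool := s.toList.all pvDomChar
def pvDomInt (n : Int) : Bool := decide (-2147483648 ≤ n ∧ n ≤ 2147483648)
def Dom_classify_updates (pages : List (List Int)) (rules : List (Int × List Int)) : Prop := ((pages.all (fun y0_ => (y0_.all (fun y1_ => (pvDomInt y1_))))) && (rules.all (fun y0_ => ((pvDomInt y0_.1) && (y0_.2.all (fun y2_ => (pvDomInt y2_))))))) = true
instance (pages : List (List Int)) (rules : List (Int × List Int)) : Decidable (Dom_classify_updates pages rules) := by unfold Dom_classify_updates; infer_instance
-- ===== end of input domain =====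

-- B drops A's index arithmetic (set intersection + repeated update.index per page) for a streaming
-- scan with a 'seen' set and early exit (alternative; same return value).

-- ===== PORT A =====
-- helper: Python's is_ordered(update, rules); rules is dict -> assoc list, lookup = first match.
-- update.index(n) is ported as (index? …).getD 0: n always comes from set(update), so index? is some.
def pvIsOrdered (update : List Int) (rules : List (Int × List Int)) : Bool :=
  ((PySem.List.enumerate update).foldl (fun (acc : List Bool) pp =>
    match rules.lookup pp.2 with
    | some after =>
        acc ++ [(PySem.Set.inter (PySem.Set.ofList update) after).all (fun n =>
          decide (pp.1 < (((PySem.List.index? update n).getD 0 : Nat) : Int)))]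
    | none => acc) []).all id

def classify_updates (pages : List (List Int)) (rules : List (Int × List Int)) : List (List Int) × List (List Int) :=
  pages.foldl (fun acc update =>
    if pvIsOrdered update rules then (acc.1 ++ [update], acc.2)
    else (acc.1, acc.2 ++ [update])) ([], [])

-- ===== PORT B =====
-- helper: B's is_ok — scan the update keeping the set of pages seen so far; fail (early return)
-- as soon as the current page has a rule target that is already seen.
def pvIsOk (rules : List (Int × List Int)) : PySem.Set Int → List Int → Bool
  | _, [] => true
  | seen, page :: rest =>
    match rules.lookup page with
    | none => pvIsOk rules (PySem.Set.add seen page) rest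
    | some targets =>
        if targets.any (fun n => PySem.Set.contains (PySem.Set.add seen page) n) then false
        else pvIsOk rules (PySem.Set.add seen page) rest

def classify_updates_alt (pages : List (List Int)) (rules : List (Int × List Int)) : List (List Int) × List (List Int) :=
  pages.foldl (fun acc update =>
    if pvIsOk rules PySem.Set.empty update then (acc.1 ++ [update], acc.2)
    else (acc.1, acc.2 ++ [update])) ([], [])

-- ===== PRECONDITION & SPEC =====
def Spec_classify_updates (pages : List (List Int)) (rules : List (Int × List Int)) (out : List (List Int) × List (List Int)) : Prop := out = classify_updates_alt pages rules
instance (pages : List (List Int)) (rules : List (Int × List Int)) (out : List (List Int) × List (List Int)) : Decidable (Spec_classify_updates pages rules out) := by unfold Spec_classify_updates; infer_instance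

-- ===== CLAIM (what is proved, stated in full; the proofs are below) =====
def Claim_equal_classify_updates : Prop := ∀ (pages : List (List Int)) (rules : List (Int × List Int)), Dom_classify_updates pages rules → Spec_classify_updates pages rules (classify_updates pages rules)

-- ===== LEMMAS AND PROOFS =====

-- the common characterisation: no position k carries a page one of whose rule targets occurs in the
-- first k+1 positions
def pvNoViol (update : List Int) (rules : List (Int × List Int)) : Prop :=
  ∀ (k : Nat) (h : k < update.length) (ts : List Int),
    rules.lookup update[k] = some ts → ∀ n ∈ ts, n ∉ update.take (k + 1)

lemma mem_take_iff_index_lt (update : List Int) (n : Int) (j : Nat)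
    (h : PySem.List.index? update n = some j) (m : Nat) : n ∈ update.take m ↔ j < m := by
  obtain ⟨hj, hval, hmin⟩ := PySem.List.getElem_of_index?_eq_some h
  constructor
  · intro hm
    obtain ⟨i, hi, hv⟩ := List.mem_iff_getElem.mp hm
    rw [List.getElem_take] at hv
    by_contra hjm
    rw [Nat.not_lt] at hjm
    have him : i < m := lt_of_lt_of_le hi (by simp [List.length_take])
    exact hmin i (lt_of_lt_of_le him hjm) hv
  · intro hm
    exact List.mem_iff_getElem.mpr ⟨j, by simp [List.length_take]; omega, by rw [List.getElem_take]; exact hval⟩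

lemma foldl_match_all (update : List Int) (rules : List (Int × List Int)) :
    ∀ (l : List (Int × Int)) (acc : List Bool),
    (l.foldl (fun (acc : List Bool) pp => match rules.lookup pp.2 with
      | some after =>
          acc ++ [(PySem.Set.inter (PySem.Set.ofList update) after).all (fun n =>
            decide (pp.1 < (((PySem.List.index? update n).getD 0 : Nat) : Int)))]
      | none => acc) acc).all id
      = (acc.all id && l.all (fun pp => match rules.lookup pp.2 with
      | some after => (PySem.Set.inter (PySem.Set.ofList update) after).all (fun n =>
            decide (pp.1 < (((PySem.List.index? update n).getD 0 : Nat) : Int)))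
      | none => true)) := by
  intro l
  induction l with
  | nil => intro acc; simp
  | cons x rest ih =>
    intro acc
    simp only [List.foldl_cons, List.all_cons]
    cases hf : rules.lookup x.2 with
    | none => rw [ih]; simp
    | some b => rw [ih]; simp [Bool.and_assoc]

lemma isOrdered_iff_noViol (update : List Int) (rules : List (Int × List Int)) :
    pvIsOrdered update rules = true ↔ pvNoViol update rules := by
  unfold pvIsOrdered
  rw [foldl_match_all update rules]
  simp only [List.all_nil, Bool.true_and, List.all_eq_true]
  constructor
  · intro h k hk ts hts n hn hnt
    have hmem : ((0 : Int) + k, update[k]) ∈ PySem.List.enumerate update :=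
      (PySem.List.mem_enumerate_iff _ _ _).mpr ⟨k, hk, rfl⟩
    have := h _ hmem
    rw [hts] at this
    simp only [List.all_eq_true, decide_eq_true_eq] at this
    have hnu : n ∈ update := List.take_subset _ _ hnt
    have hin : n ∈ PySem.Set.inter (PySem.Set.ofList update) ts := by
      rw [PySem.Set.mem_inter, PySem.Set.mem_ofList]; exact ⟨hnu, hn⟩
    have hlt := this n hin
    obtain ⟨j, hj⟩ := Option.isSome_iff_exists.mp ((PySem.List.index?_isSome_iff update n).mpr hnu)
    rw [hj] at hlt
    have : j < k + 1 := (mem_take_iff_index_lt update n j hj (k+1)).mp hnt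
    simp at hlt; omega
  · intro h pp hpp
    obtain ⟨k, hk, rfl⟩ := (PySem.List.mem_enumerate_iff _ _ _).mp hpp
    cases hts : rules.lookup update[k] with
    | none => rfl
    | some ts =>
      simp only [List.all_eq_true, decide_eq_true_eq]
      intro n hin
      rw [PySem.Set.mem_inter, PySem.Set.mem_ofList] at hin
      obtain ⟨hnu, hnts⟩ := hin
      obtain ⟨j, hj⟩ := Option.isSome_iff_exists.mp ((PySem.List.index?_isSome_iff update n).mpr hnu)
      have hnt := h k hk ts hts n hnts
      rw [mem_take_iff_index_lt update n j hj (k+1)] at hnt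
      rw [hj]; simp; omega

lemma isOk_iff (rules : List (Int × List Int)) :
    ∀ (rest pre : List Int) (seen : PySem.Set Int), (∀ x : Int, x ∈ seen ↔ x ∈ pre) →
    (pvIsOk rules seen rest = true ↔
      ∀ (k : Nat) (h : k < rest.length) (ts : List Int),
        rules.lookup rest[k] = some ts → ∀ n ∈ ts, n ∉ pre ++ rest.take (k + 1)) := by
  intro rest
  induction rest with
  | nil =>
    intro pre seen _
    simp [pvIsOk]
  | cons page rest ih =>
    intro pre seen hseen
    have hseen' : ∀ x : Int, x ∈ PySem.Set.add seen page ↔ x ∈ pre ++ [page] := by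
      intro x; rw [PySem.Set.mem_add, hseen]; simp
    have split : ∀ (Q : Prop), ((∀ (k : Nat) (h : k < (page :: rest).length) (ts : List Int),
        rules.lookup (page :: rest)[k] = some ts → ∀ n ∈ ts, n ∉ pre ++ (page :: rest).take (k + 1)) ↔
        ((∀ (ts : List Int), rules.lookup page = some ts → ∀ n ∈ ts, n ∉ pre ++ [page]) ∧
         (∀ (k : Nat) (h : k < rest.length) (ts : List Int),
          rules.lookup rest[k] = some ts → ∀ n ∈ ts, n ∉ (pre ++ [page]) ++ rest.take (k + 1)))) := by
      intro _
      constructor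
      · intro h
        refine ⟨fun ts hts n hn => by simpa using h 0 (by simp) ts (by simpa using hts) n hn, ?_⟩
        intro k hk ts hts n hn
        have := h (k+1) (by simpa using Nat.succ_lt_succ hk) ts (by simpa using hts) n hn
        simpa [List.append_assoc] using this
      · intro ⟨h0, h1⟩ k
        match k with
        | 0 => intro _ ts hts n hn; simpa using h0 ts (by simpa using hts) n hn
        | k+1 =>
          intro hk ts hts n hn
          have := h1 k (by simpa using Nat.lt_of_succ_lt_succ hk) ts (by simpa using hts) n hn
          simpa [List.append_assoc] using this
    rw [split True]
    unfold pvIsOk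
    cases hl : rules.lookup page with
    | none =>
      rw [ih (pre ++ [page]) _ hseen']
      constructor
      · exact fun h => ⟨fun ts hts => (nomatch hts), h⟩
      · exact fun h => h.2
    | some ts =>
      by_cases hany : ts.any (fun n => PySem.Set.contains (PySem.Set.add seen page) n) = true
      · simp only [hany, if_true]
        constructor
        · intro h; cases h
        · intro ⟨h0, _⟩
          obtain ⟨n, hn, hc⟩ := List.any_eq_true.mp hany
          rw [PySem.Set.contains_iff, hseen'] at hc
          exact (h0 ts rfl n hn hc).elim
      · simp only [hany, if_false, Bool.false_eq_true]
        rw [ih (pre ++ [page]) _ hseen']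
        constructor
        · intro h
          refine ⟨?_, h⟩
          intro ts' hts' n hn hmem
          injection hts' with he; subst he
          exact hany (List.any_eq_true.mpr ⟨n, hn, by rw [PySem.Set.contains_iff, hseen']; exact hmem⟩)
        · exact fun h => h.2

lemma isOrdered_eq_isOk (update : List Int) (rules : List (Int × List Int)) :
    pvIsOrdered update rules = pvIsOk rules PySem.Set.empty update := by
  rw [Bool.eq_iff_iff, isOrdered_iff_noViol]
  rw [isOk_iff rules update [] PySem.Set.empty (by intro x; simp [PySem.Set.empty])]
  unfold pvNoViol
  simp

lemma classify_eq (pages : List (List Int)) (rules : List (Int × List Int)) :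
    classify_updates pages rules = classify_updates_alt pages rules := by
  unfold classify_updates classify_updates_alt
  apply PySem.List.foldl_congr_mem
  intro acc x _
  rw [isOrdered_eq_isOk]

-- ===== VERDICT (by name: the statement is the Claim_ definition above) =====
theorem classify_updates_spec : Claim_equal_classify_updates := by
  intro pages rules _
  unfold Spec_classify_updates
  exact classify_eq pages rules
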